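-- pv_equiv track=rewrite | github.com/fedemelo/uniandes-profesor-ip | N3/labs/L2/modulo.py | verificar_simetria_vocales
-- ===== SOURCE A (Python) =====
-- def verificar_simetria_vocales(cadena: str) -> bool:
--     """
--     Verifica si las vocales en una cadena forman un patrón simétrico.
--
--     Args:
--         cadena: La cadena a analizar
--
--     Returns:
--         True si las vocales forman un patrón simétrico, False en caso contrario
--     """
--     i = 0
--     j = len(cadena) - 1
--
--     es_simetrico = True
--     while i < j and es_simetrico:
--         if cadena[i].lower() not in "aeiou":
--             i += 1
--         elif cadena[j].lower() not in "aeiou":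
--             j -= 1
--         elif cadena[i].lower() != cadena[j].lower():
--             es_simetrico = False
--         else:
--             i += 1
--             j -= 1
--
--     return es_simetrico
-- ===== SOURCE B (Python) =====
-- def verificar_simetria_vocales(cadena: str) -> bool:
--     vocales = [c for c in cadena.lower() if c in "aeiou"]
--     return vocales == vocales[::-1]
-- ===== Notes on version B (the rewrite author's own statement) =====
-- stated objective: simpler
-- what changed: Replaces the interleaved skip/compare two-pointer while-loop with a single extraction pass (lowercased vowels in order) followed by a plain list-equals-its-reverse palindrome check.
import Mathlib
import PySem

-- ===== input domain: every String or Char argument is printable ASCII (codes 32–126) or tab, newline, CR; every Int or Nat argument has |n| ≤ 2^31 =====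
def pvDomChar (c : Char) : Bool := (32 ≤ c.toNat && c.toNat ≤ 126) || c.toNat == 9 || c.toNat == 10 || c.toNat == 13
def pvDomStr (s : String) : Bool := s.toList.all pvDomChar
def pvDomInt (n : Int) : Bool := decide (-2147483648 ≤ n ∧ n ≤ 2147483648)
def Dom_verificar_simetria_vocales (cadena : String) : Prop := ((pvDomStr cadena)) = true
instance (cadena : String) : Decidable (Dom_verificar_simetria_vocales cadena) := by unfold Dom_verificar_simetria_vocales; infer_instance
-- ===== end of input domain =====

-- B replaces A's interleaved skip/compare two-pointer loop by one extraction pass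
-- (lowercased vowels in order) followed by a list-equals-its-reverse check; objective: simpler.

-- ===== PORT A =====
-- 'c in "aeiou"' on a single character = membership in the vowel list
def pvIsVowel (c : Char) : Bool := ['a','e','i','o','u'].contains c

-- the while-loop of A: state (i, j); the 'es_simetrico = False' branch returns false and exits,
-- exactly as the Python loop then falls out with es_simetrico == False.
-- Indices are ports of Python's i, j; whenever read, 0 ≤ i < j ≤ len-1, so getD never hits its default.
def pvLoopA (l : List Char) (i j : Nat) : Bool :=
  if _h : i < j then
    if ¬ pvIsVowel (PySem.Chars.lowerChar (l.getD i ' ')) then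
      pvLoopA l (i+1) j
    else if ¬ pvIsVowel (PySem.Chars.lowerChar (l.getD j ' ')) then
      pvLoopA l i (j-1)
    else if PySem.Chars.lowerChar (l.getD i ' ') ≠ PySem.Chars.lowerChar (l.getD j ' ') then
      false
    else
      pvLoopA l (i+1) (j-1)
  else true
termination_by j - i
decreasing_by all_goals omega

-- j = len(cadena) - 1: for the empty string Python has j = -1 and the loop is skipped (i < j false);
-- Nat's 0 - 1 = 0 skips the loop the same way.
def verificar_simetria_vocales (cadena : String) : Bool :=
  pvLoopA cadena.toList 0 (cadena.toList.length - 1)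

-- ===== PORT B =====
-- vocales = [c for c in cadena.lower() if c in "aeiou"]; return vocales == vocales[::-1]
-- (vocales[::-1] is the reversed list: PySem.List.slice?_none_none_neg_one)
def verificar_simetria_vocales_alt (cadena : String) : Bool :=
  let vocales := (PySem.Str.lower cadena).toList.filter pvIsVowel
  vocales == vocales.reverse

-- ===== PRECONDITION & SPEC =====
def Spec_verificar_simetria_vocales (cadena : String) (out : Bool) : Prop := out = verificar_simetria_vocales_alt cadena
instance (cadena : String) (out : Bool) : Decidable (Spec_verificar_simetria_vocales cadena out) := by unfold Spec_verificar_simetria_vocales; infer_instance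

-- ===== CLAIM (what is proved, stated in full; the proofs are below) =====
def Claim_equal_verificar_simetria_vocales : Prop := ∀ (cadena : String), Dom_verificar_simetria_vocales cadena → Spec_verificar_simetria_vocales cadena (verificar_simetria_vocales cadena)

-- ===== LEMMAS AND PROOFS =====

-- the lowercased-vowel subsequence of a list of characters
def pvF (l : List Char) : List Char := (PySem.Chars.lower l).filter pvIsVowel

lemma pvF_nil : pvF [] = [] := rfl

lemma pvF_cons (c : Char) (l : List Char) :
    pvF (c :: l) = if pvIsVowel (PySem.Chars.lowerChar c)
      then PySem.Chars.lowerChar c :: pvF l else pvF l := by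
  simp [pvF, PySem.Chars.lower, List.filter]
  split <;> simp_all

lemma pvF_append (l₁ l₂ : List Char) : pvF (l₁ ++ l₂) = pvF l₁ ++ pvF l₂ := by
  simp [pvF, PySem.Chars.lower]

lemma pvF_length_le (l : List Char) : (pvF l).length ≤ l.length := by
  calc (pvF l).length ≤ (PySem.Chars.lower l).length := List.length_filter_le _ _
    _ = l.length := by simp [PySem.Chars.lower]

lemma pal_short {α : Type} (xs : List α) (h : xs.length ≤ 1) : xs = xs.reverse := by
  match xs with
  | [] => rfl
  | [a] => rfl
  | a :: b :: t => simp at h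

lemma pal_sandwich {α : Type} (a b : α) (m : List α) :
    (a :: (m ++ [b]) = (a :: (m ++ [b])).reverse) ↔ (a = b ∧ m = m.reverse) := by
  constructor
  · intro h
    have h' : a :: (m ++ [b]) = b :: (m.reverse ++ [a]) := by simpa using h
    obtain ⟨hab, hm⟩ := List.cons_eq_cons.mp h'
    subst hab
    exact ⟨rfl, List.append_inj_left hm (by simp)⟩
  · rintro ⟨rfl, hm⟩
    conv_lhs => rw [hm]
    simp

lemma pvBeq_eq_decide (x y : List Char) : (x == y) = decide (x = y) := by
  by_cases h : x = y <;> simp [h]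

-- the segment cadena[i..j] (inclusive) the loop still has to examine
def pvSeg (l : List Char) (i j : Nat) : List Char := (l.take (j+1)).drop i

lemma pvSeg_head (l : List Char) (i j : Nat) (hij : i ≤ j) (hj : j < l.length) :
    pvSeg l i j = l.getD i ' ' :: pvSeg l (i+1) j := by
  have hi : i < (l.take (j+1)).length := by simp; omega
  rw [pvSeg, List.drop_eq_getElem_cons hi, pvSeg]
  congr 1
  rw [List.getElem_take, List.getD_eq_getElem l ' ' (by omega)]

lemma pvSeg_last (l : List Char) (i j : Nat) (hij : i ≤ j) (hj0 : 0 < j) (hj : j < l.length) :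
    pvSeg l i j = pvSeg l i (j-1) ++ [l.getD j ' '] := by
  have h1 : l.take (j+1) = l.take j ++ [l[j]] := by
    rw [List.take_add_one]; simp [List.getElem?_eq_getElem hj]
  have h2 : j - 1 + 1 = j := by omega
  rw [pvSeg, h1, List.drop_append_of_le_length (by simp; omega), pvSeg, h2,
    List.getD_eq_getElem l ' ' hj]

lemma pvSeg_short (l : List Char) (i j : Nat) (h : j ≤ i) : (pvSeg l i j).length ≤ 1 := by
  simp [pvSeg]; omega

lemma pvLoopA_eq_aux (l : List Char) : ∀ n i j, j - i ≤ n → j < l.length →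
    pvLoopA l i j = decide (pvF (pvSeg l i j) = (pvF (pvSeg l i j)).reverse) := by
  intro n
  induction n with
  | zero =>
    intro i j h hj
    rw [pvLoopA, dif_neg (by omega)]
    have hshort : (pvF (pvSeg l i j)).length ≤ 1 :=
      le_trans (pvF_length_le _) (pvSeg_short l i j (by omega))
    symm
    rw [decide_eq_true_iff]
    exact pal_short _ hshort
  | succ n ih =>
    intro i j h hj
    by_cases hij : i < j
    · rw [pvLoopA, dif_pos hij]
      by_cases va : pvIsVowel (PySem.Chars.lowerChar (l.getD i ' '))
      · by_cases vb : pvIsVowel (PySem.Chars.lowerChar (l.getD j ' '))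
        · rw [if_neg (by simpa using va), if_neg (by simpa using vb)]
          have hdec : pvSeg l i j =
              l.getD i ' ' :: (pvSeg l (i+1) (j-1) ++ [l.getD j ' ']) := by
            rw [pvSeg_head l i j (by omega) hj,
              pvSeg_last l (i+1) j (by omega) (by omega) hj]
          rw [hdec, pvF_cons, if_pos va, pvF_append]
          have hFb : pvF [l.getD j ' '] = [PySem.Chars.lowerChar (l.getD j ' ')] := by
            rw [pvF_cons, if_pos vb, pvF_nil]
          rw [hFb]
          by_cases hab : PySem.Chars.lowerChar (l.getD i ' ') =
              PySem.Chars.lowerChar (l.getD j ' ')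
          · rw [if_neg (not_not_intro hab)]
            rw [ih (i+1) (j-1) (by omega) (by omega)]
            congr 1
            rw [eq_iff_iff, pal_sandwich]
            exact ⟨fun hm => ⟨hab, hm⟩, fun hc => hc.2⟩
          · rw [if_pos hab]
            symm
            rw [decide_eq_false_iff_not, pal_sandwich]
            exact fun hc => hab hc.1
        · rw [if_neg (by simpa using va), if_pos (by simpa using vb)]
          rw [pvSeg_last l i j (by omega) (by omega) hj, pvF_append]
          have hFb : pvF [l.getD j ' '] = [] := by
            rw [pvF_cons, if_neg vb, pvF_nil]
          rw [hFb, List.append_nil, ih i (j-1) (by omega) (by omega)]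
      · rw [if_pos (by simpa using va)]
        rw [pvSeg_head l i j (by omega) hj, pvF_cons, if_neg va,
          ih (i+1) j (by omega) hj]
    · rw [pvLoopA, dif_neg hij]
      have hshort : (pvF (pvSeg l i j)).length ≤ 1 :=
        le_trans (pvF_length_le _) (pvSeg_short l i j (by omega))
      symm
      rw [decide_eq_true_iff]
      exact pal_short _ hshort

theorem verificar_simetria_vocales_spec : Claim_equal_verificar_simetria_vocales := by
  intro cadena _
  unfold Spec_verificar_simetria_vocales verificar_simetria_vocales verificar_simetria_vocales_alt
  have hF : (PySem.Str.lower cadena).toList.filter pvIsVowel = pvF cadena.toList := by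
    simp [pvF]
  rw [hF]
  rcases h : cadena.toList with _ | ⟨c, t⟩
  · simp [pvLoopA, pvF_nil]
  · rw [← h]
    have hlen : 0 < cadena.toList.length := by rw [h]; simp
    have := pvLoopA_eq_aux cadena.toList (cadena.toList.length - 1) 0
      (cadena.toList.length - 1) (by omega) (by omega)
    rw [this]
    have hseg : pvSeg cadena.toList 0 (cadena.toList.length - 1) = cadena.toList := by
      unfold pvSeg
      rw [List.drop_zero, List.take_of_length_le (by omega)]
    rw [hseg, pvBeq_eq_decide]
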